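-- pv_equiv track=rewrite | github.com/danlawand/algorithms | amazon_problems/interview.py | findMaxHealthSum
-- ===== SOURCE A (Python) =====
-- def findMaxHealthSum(health, serverType, m):
--     a = []
--     for i in range(len(health)):
--         a.append((i, health[i], serverType[i]))
--
--     b = sorted(a, key=lambda element: element[2], reverse=True)
--     sT = [0]
--     i = 0
--     csT = b[0][2]
--     for item in b:
--         if csT != item[2]:
--             sT.append(0)
--             i += 1
--             csT = item[2]
--         sT[i] += item[1]
--     sT = sorted(sT, reverse=True)
--     ans = 0
--     for i in range(0, min(m, len(sT))):
--         ans += sT[i]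
--     return ans
-- ===== SOURCE B (Python) =====
-- def findMaxHealthSum(health, serverType, m):
--     # Group healths by server type in one O(n) pass, then sort only the
--     # per-type sums (one per distinct type) and take the top m.
--     sums = {}
--     for h, t in zip(health, serverType):
--         sums[t] = sums.get(t, 0) + h
--     top = sorted(sums.values(), reverse=True)
--     return sum(top[:max(m, 0)])
-- ===== Notes on version B (the rewrite author's own statement) =====
-- stated objective: faster
-- what changed: Replaces the sort of all n servers plus an index-juggling run-grouping loop by a single O(n) dict-grouping pass, sorting only the per-type group sums (g of them) and summing a slice.
import Mathlib
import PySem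

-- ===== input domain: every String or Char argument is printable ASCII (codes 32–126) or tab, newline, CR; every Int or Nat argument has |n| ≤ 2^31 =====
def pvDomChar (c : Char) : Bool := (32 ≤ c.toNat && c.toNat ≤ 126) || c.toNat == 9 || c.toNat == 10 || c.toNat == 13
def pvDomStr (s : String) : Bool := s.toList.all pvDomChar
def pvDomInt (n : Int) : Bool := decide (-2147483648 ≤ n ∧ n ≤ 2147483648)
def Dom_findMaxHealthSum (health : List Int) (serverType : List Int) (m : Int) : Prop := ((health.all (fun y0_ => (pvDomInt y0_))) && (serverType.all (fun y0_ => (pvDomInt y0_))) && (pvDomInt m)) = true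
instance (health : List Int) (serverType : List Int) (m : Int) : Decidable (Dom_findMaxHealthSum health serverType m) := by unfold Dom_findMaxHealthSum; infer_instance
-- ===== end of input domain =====

-- B replaces A's sort-all-servers + run-grouping pass by one dict-grouping pass and a sort of
-- only the per-type sums (objective: faster, O(n + g log g) vs O(n log n)).

-- ===== PORT A =====
-- the body of A's grouping 'for item in b:' loop, named so the proofs can speak about it;
-- 'sT[i] += item[1]' is pySetD/pyGetD at index i, which A keeps equal to len(sT)-1 (always in range)
def pvStepA (st : List Int × Int × Int) (item : Int × Int × Int) : List Int × Int × Int :=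
  let st' := if st.2.2 ≠ item.2.2 then (st.1 ++ [(0 : Int)], st.2.1 + 1, item.2.2) else st
  (PySem.List.pySetD st'.1 st'.2.1 (PySem.List.pyGetD st'.1 st'.2.1 0 + item.2.1), st'.2.1, st'.2.2)

def findMaxHealthSum (health : List Int) (serverType : List Int) (m : Int) : Int :=
  -- a = [(i, health[i], serverType[i]) …]; Pre_ makes every index valid, so the pyGetD defaults are never used
  let a : List (Int × Int × Int) :=
    (PySem.List.pyRange 0 (health.length : Int) 1).foldl
      (fun acc i => acc ++ [(i, PySem.List.pyGetD health i 0, PySem.List.pyGetD serverType i 0)]) []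
  let b := PySem.List.sorted a (fun e => e.2.2) true
  -- csT = b[0][2] (Python raises IndexError on empty b; Pre_ excludes it, the default is never used)
  let st := b.foldl pvStepA ([0], 0, (PySem.List.pyGetD b 0 (0, 0, 0)).2.2)
  let sT := PySem.List.sorted st.1 (fun x => x) true
  (PySem.List.pyRange 0 (min m (sT.length : Int)) 1).foldl
    (fun ans i => ans + PySem.List.pyGetD sT i 0) 0

-- ===== PORT B =====
def findMaxHealthSum_alt (health : List Int) (serverType : List Int) (m : Int) : Int :=
  let sums : PySem.Dict Int Int :=
    (health.zip serverType).foldl (fun d p => d.insert p.2 (d.getD p.2 0 + p.1)) PySem.Dict.empty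
  let top := PySem.List.sorted sums.values (fun x => x) true
  (PySem.List.slice top none (some (max m 0))).sum

-- ===== PRECONDITION & SPEC =====
-- Pre_ excludes exactly the inputs where A raises IndexError: empty health (it reads b[0])
-- and serverType shorter than health (it reads serverType[i] for i in range(len(health))).
def Pre_findMaxHealthSum (health : List Int) (serverType : List Int) (m : Int) : Prop :=
  health ≠ [] ∧ health.length ≤ serverType.length
instance (health : List Int) (serverType : List Int) (m : Int) : Decidable (Pre_findMaxHealthSum health serverType m) := by unfold Pre_findMaxHealthSum; infer_instance

def pvWitness_findMaxHealthSum : List Int × List Int × Int := ([3, 1, 4], [2, 1, 2], 2)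

def Spec_findMaxHealthSum (health : List Int) (serverType : List Int) (m : Int) (out : Int) : Prop := out = findMaxHealthSum_alt health serverType m
instance (health : List Int) (serverType : List Int) (m : Int) (out : Int) : Decidable (Spec_findMaxHealthSum health serverType m out) := by unfold Spec_findMaxHealthSum; infer_instance

-- ===== CLAIM (what is proved, stated in full; the proofs are below) =====
def Claim_equal_findMaxHealthSum : Prop := ∀ (health : List Int) (serverType : List Int) (m : Int), Dom_findMaxHealthSum health serverType m → Pre_findMaxHealthSum health serverType m → Spec_findMaxHealthSum health serverType m (findMaxHealthSum health serverType m)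

-- ===== LEMMAS AND PROOFS =====

-- per-type sum of the zipped (health, type) pairs
def pvSum (z : List (Int × Int)) (t : Int) : Int := ((z.filter (fun p => p.2 == t)).map (·.1)).sum
-- per-type sum over A's triples (index, health, type)
def pvSumT (l : List (Int × Int × Int)) (t : Int) : Int := ((l.filter (fun x => x.2.2 == t)).map (·.2.1)).sum

-- the list of bucket sums A's grouping loop builds, as a structural recursion
def pvGo (cur acc : Int) : List (Int × Int × Int) → List Int
  | [] => [acc]
  | x :: r => if cur ≠ x.2.2 then acc :: pvGo x.2.2 x.2.1 r else pvGo cur (acc + x.2.1) r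

def pvLastKey (cur : Int) : List (Int × Int × Int) → Int
  | [] => cur
  | x :: r => pvLastKey x.2.2 r

theorem pvSet_last (l : List Int) (a v : Int) : (l ++ [a]).set l.length v = l ++ [v] := by
  induction l with
  | nil => rfl
  | cons x r ih => simp [List.set, ih]

theorem pvGetD_last (l : List Int) (a : Int) : (l ++ [a]).getD l.length 0 = a := by
  simp [List.getD_eq_getElem?_getD]

theorem pvFold_eq_go (l : List (Int × Int × Int)) (pre : List Int) (acc cur : Int) :
    l.foldl pvStepA (pre ++ [acc], (pre.length : Int), cur)
      = (pre ++ pvGo cur acc l, (pre.length : Int) + (pvGo cur acc l).length - 1, pvLastKey cur l) := by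
  induction l generalizing pre acc cur with
  | nil => simp [pvGo, pvLastKey]
  | cons x r ih =>
    simp only [List.foldl_cons, pvGo, pvLastKey]
    by_cases h : cur = x.2.2
    · have hstep : pvStepA (pre ++ [acc], (pre.length : Int), cur) x
          = (pre ++ [acc + x.2.1], (pre.length : Int), cur) := by
        simp only [pvStepA]
        rw [if_neg (by simp [h])]
        have h1 : ((pre.length : Int)) = ((pre.length : Nat) : Int) := rfl
        rw [h1, PySem.List.pySetD_natCast, PySem.List.pyGetD_natCast]
        simp [pvSet_last, pvGetD_last, List.getD_eq_getElem?_getD]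
      rw [hstep, if_neg (by simp [h]), ih pre (acc + x.2.1) cur, h]
    · have hstep : pvStepA (pre ++ [acc], (pre.length : Int), cur) x
          = ((pre ++ [acc]) ++ [x.2.1], ((pre ++ [acc]).length : Int), x.2.2) := by
        simp only [pvStepA]
        rw [if_pos (by simp [h])]
        have h1 : ((pre.length : Int) + 1) = (((pre.length + 1 : Nat)) : Int) := by push_cast; ring
        have h2 : pre.length + 1 = (pre ++ [acc]).length := by simp
        rw [h1, PySem.List.pySetD_natCast, PySem.List.pyGetD_natCast, h2,
          pvSet_last, pvGetD_last]
        simp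
      rw [hstep, if_pos (by simp [h]), ih (pre ++ [acc]) x.2.1 x.2.2]
      simp only [Prod.mk.injEq]
      refine ⟨by simp, by simp; omega, trivial⟩

theorem pvSumT_cons_self (x : Int × Int × Int) (r : List (Int × Int × Int)) :
    pvSumT (x :: r) x.2.2 = x.2.1 + pvSumT r x.2.2 := by
  simp [pvSumT, List.filter_cons]

theorem pvSumT_cons_of_ne (x : Int × Int × Int) (r : List (Int × Int × Int)) (t : Int)
    (h : x.2.2 ≠ t) : pvSumT (x :: r) t = pvSumT r t := by
  simp [pvSumT, List.filter_cons, h]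

theorem pvGo_perm (l : List (Int × Int × Int)) (cur acc : Int)
    (hp : l.Pairwise (fun p q => q.2.2 ≤ p.2.2)) (hle : ∀ x ∈ l, x.2.2 ≤ cur) :
    (pvGo cur acc l).Perm
      ((acc + pvSumT l cur) ::
        (PySem.Set.ofList ((l.filter (fun x => !(x.2.2 == cur))).map (·.2.2))).map (pvSumT l)) := by
  induction l generalizing cur acc with
  | nil => simp [pvGo, pvSumT]
  | cons x r ih =>
    rcases List.pairwise_cons.mp hp with ⟨hx, hr⟩
    by_cases h : x.2.2 = cur
    · -- same type as current bucket: accumulate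
      rw [pvGo, if_neg (by omega)]
      have hfil : (x :: r).filter (fun y => !(y.2.2 == cur)) = r.filter (fun y => !(y.2.2 == cur)) := by
        simp [List.filter_cons, h]
      have hmapc : (PySem.Set.ofList ((r.filter (fun y => !(y.2.2 == cur))).map (·.2.2))).map (pvSumT (x :: r))
          = (PySem.Set.ofList ((r.filter (fun y => !(y.2.2 == cur))).map (·.2.2))).map (pvSumT r) := by
        apply List.map_congr_left
        intro t ht
        rw [PySem.Set.mem_ofList] at ht
        rcases List.mem_map.mp ht with ⟨y, hy, rfl⟩
        have : ¬ (y.2.2 == cur) = true := by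
          have := List.of_mem_filter hy; simpa using this
        apply pvSumT_cons_of_ne
        simp at this; omega
      rw [hfil, hmapc]
      have hps : pvSumT (x :: r) cur = x.2.1 + pvSumT r cur := by
        rw [← h]; exact pvSumT_cons_self x r
      rw [hps, ← add_assoc]
      exact ih cur (acc + x.2.1) hr (fun y hy => le_of_le_of_eq (hx y hy) h)
    · -- new bucket opens at x.2.2 < cur
      have hlt : x.2.2 < cur := lt_of_le_of_ne (hle x (by simp)) h
      rw [pvGo, if_pos (by omega)]
      have hnoc : ∀ y ∈ x :: r, y.2.2 ≠ cur := by
        intro y hy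
        rcases List.mem_cons.mp hy with rfl | hy
        · omega
        · have := hx y hy; omega
      have hsum0 : pvSumT (x :: r) cur = 0 := by
        have : (x :: r).filter (fun y => y.2.2 == cur) = [] := by
          rw [List.filter_eq_nil_iff]
          intro y hy
          simpa using hnoc y hy
        simp [pvSumT, this]
      have hfilall : (x :: r).filter (fun y => !(y.2.2 == cur)) = x :: r := by
        rw [List.filter_eq_self]
        intro y hy
        simpa using hnoc y hy
      rw [hsum0, hfilall, add_zero]
      -- set permutation: first occurrences of all types vs x.2.2 :: first occurrences of non-x types
      have hsetperm : (PySem.Set.ofList ((x :: r).map (·.2.2))).Perm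
          (x.2.2 :: PySem.Set.ofList ((r.filter (fun y => !(y.2.2 == x.2.2))).map (·.2.2))) := by
        rw [List.perm_ext_iff_of_nodup (PySem.Set.nodup_ofList _)]
        · intro t
          rw [PySem.Set.mem_ofList]
          simp only [List.mem_cons, PySem.Set.mem_ofList, List.mem_map, List.mem_filter]
          constructor
          · rintro ⟨y, hy, rfl⟩
            rcases hy with rfl | hy
            · left; rfl
            · by_cases ht : y.2.2 = x.2.2
              · left; exact ht
              · right; exact ⟨y, ⟨hy, by simpa using ht⟩, rfl⟩
          · rintro (rfl | ⟨y, ⟨hy, _⟩, rfl⟩)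
            · exact ⟨x, by simp, rfl⟩
            · exact ⟨y, by simp [hy], rfl⟩
        · constructor
          · intro t ht
            rw [PySem.Set.mem_ofList] at ht
            rcases List.mem_map.mp ht with ⟨y, hy, rfl⟩
            have := List.of_mem_filter hy
            simp at this
            omega
          · exact PySem.Set.nodup_ofList _
      have hmapc2 : (PySem.Set.ofList ((r.filter (fun y => !(y.2.2 == x.2.2))).map (·.2.2))).map (pvSumT (x :: r))
          = (PySem.Set.ofList ((r.filter (fun y => !(y.2.2 == x.2.2))).map (·.2.2))).map (pvSumT r) := by
        apply List.map_congr_left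
        intro t ht
        rw [PySem.Set.mem_ofList] at ht
        rcases List.mem_map.mp ht with ⟨y, hy, rfl⟩
        have := List.of_mem_filter hy
        apply pvSumT_cons_of_ne
        simp at this; omega
      have hperm2 := (hsetperm.map (pvSumT (x :: r)))
      simp only [List.map_cons] at hperm2
      rw [pvSumT_cons_self, hmapc2] at hperm2
      have hih := ih x.2.2 x.2.1 hr hx
      exact (List.Perm.cons acc hih).trans (List.Perm.cons acc hperm2.symm)

theorem pvDict_getD (z : List (Int × Int)) (d : PySem.Dict Int Int) (t : Int) :
    (z.foldl (fun d p => d.insert p.2 (d.getD p.2 0 + p.1)) d).getD t 0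
      = d.getD t 0 + pvSum z t := by
  induction z generalizing d with
  | nil => simp [pvSum]
  | cons p r ih =>
    simp only [List.foldl_cons, ih]
    by_cases h : p.2 = t
    · subst h
      rw [PySem.Dict.getD_insert_self]
      simp [pvSum, List.filter_cons]
      ring
    · rw [PySem.Dict.getD_insert_of_ne _ _ _ (fun hh => h hh.symm)]
      simp [pvSum, List.filter_cons, h]

theorem pvSorted_rev_eq_of_perm (l₁ l₂ : List Int) (h : l₁.Perm l₂) :
    PySem.List.sorted l₁ (fun x => x) true = PySem.List.sorted l₂ (fun x => x) true := by
  apply PySem.List.eq_of_perm_of_pairwise_le_of_injective (fun x : Int => -x) neg_injective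
  · exact ((PySem.List.sorted_perm l₁ _ true).trans h).trans (PySem.List.sorted_perm l₂ _ true).symm
  · exact (PySem.List.sorted_pairwise_rev l₁ _).imp (fun h => by omega)
  · exact (PySem.List.sorted_pairwise_rev l₂ _).imp (fun h => by omega)

theorem pvTail (xs : List Int) (m : Int) :
    (PySem.List.pyRange 0 (min m (xs.length : Int)) 1).foldl
        (fun ans i => ans + PySem.List.pyGetD xs i 0) 0
      = (PySem.List.slice xs none (some (max m 0))).sum := by
  have hs : PySem.List.slice xs none (some (max m 0)) = xs.take (max m 0).toNat :=
    PySem.List.slice_to xs (le_max_right m 0)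
  rw [PySem.List.foldl_add, hs]
  by_cases hm : m ≤ 0
  · rw [PySem.List.pyRange_one_eq_nil (by omega)]
    simp [(by omega : (max m 0).toNat = 0)]
  · push_neg at hm
    have hk : min m (xs.length : Int) = ((min m.toNat xs.length : Nat) : Int) := by omega
    have hmax : (max m 0).toNat = m.toNat := by omega
    rw [hk, hmax, PySem.List.pyRange_zero_natCast, List.map_map]
    have hmap : (List.range (min m.toNat xs.length)).map
        ((fun i => PySem.List.pyGetD xs i 0) ∘ (fun k : Nat => (k : Int)))
        = xs.take (min m.toNat xs.length) := by
      apply List.ext_getElem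
      · simp
      · intro j h1 h2
        simp only [List.getElem_map, Function.comp_apply, List.getElem_range, List.getElem_take,
          PySem.List.pyGetD_natCast]
        have hj : j < xs.length := by simp at h1; omega
        simp [List.getD_eq_getElem?_getD, List.getElem?_eq_getElem hj]
    rw [hmap]
    rcases Nat.lt_or_ge xs.length m.toNat with h | h
    · rw [min_eq_right (by omega), List.take_of_length_le (le_refl _),
        List.take_of_length_le (by omega), zero_add]
    · rw [min_eq_left h, zero_add]

theorem pvMain (health serverType : List Int) (m : Int)
    (hne : health ≠ []) (hlen : health.length ≤ serverType.length) :
    findMaxHealthSum health serverType m = findMaxHealthSum_alt health serverType m := by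
  simp only [findMaxHealthSum, findMaxHealthSum_alt]
  rw [PySem.List.foldl_append_singleton_eq_map, List.nil_append]
  set a : List (Int × Int × Int) := (PySem.List.pyRange 0 (health.length : Int) 1).map
      (fun i => (i, PySem.List.pyGetD health i 0, PySem.List.pyGetD serverType i 0)) with ha
  -- the pair projection of a is exactly the zip
  have hfa : a.map (fun x => x.2) = health.zip serverType := by
    apply List.ext_getElem
    · simp [ha, PySem.List.length_pyRange_one]
      omega
    · intro j h1 h2
      simp only [ha, List.getElem_map, PySem.List.getElem_pyRange_one]
      have hj : j < health.length := by
        simp [ha, PySem.List.length_pyRange_one] at h1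
        omega
      rw [List.getElem_zip]
      have e1 : PySem.List.pyGetD health ((0:Int) + (j:Int)) 0 = health[j] := by
        rw [zero_add, PySem.List.pyGetD_natCast, List.getD_eq_getElem?_getD,
          List.getElem?_eq_getElem hj]
        rfl
      have e2 : PySem.List.pyGetD serverType ((0:Int) + (j:Int)) 0 = serverType[j] := by
        rw [zero_add, PySem.List.pyGetD_natCast, List.getD_eq_getElem?_getD,
          List.getElem?_eq_getElem (by omega : j < serverType.length)]
        rfl
      simp [e1, e2, List.getElem?_eq_getElem hj,
        List.getElem?_eq_getElem (show j < serverType.length by omega)]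
  have hma : a.map (fun x => x.2.2) = (health.zip serverType).map (fun p => p.2) := by
    conv_rhs => rw [← hfa, List.map_map]
    rfl
  set b := PySem.List.sorted a (fun e => e.2.2) true with hbdef
  have hba : b.Perm a := PySem.List.sorted_perm a _ true
  have hbne : b ≠ [] := by
    rw [hbdef, Ne, PySem.List.sorted_eq_nil_iff]
    intro hanil
    have : a.length = 0 := by rw [hanil]; rfl
    rw [ha] at this
    simp [PySem.List.length_pyRange_one] at this
    exact hne this
  obtain ⟨bx, br, hbcons⟩ := List.exists_cons_of_ne_nil hbne
  have hget0 : PySem.List.pyGetD b 0 ((0 : Int), (0 : Int), (0 : Int)) = bx := by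
    rw [hbcons]; exact PySem.List.pyGetD_zero_cons _ _ _
  have hfold' : b.foldl pvStepA ([0], 0, bx.2.2)
      = (pvGo bx.2.2 0 b, (0 : Int) + ((pvGo bx.2.2 0 b).length : Int) - 1, pvLastKey bx.2.2 b) := by
    simpa using pvFold_eq_go b [] 0 bx.2.2
  have hpw : b.Pairwise (fun p q => q.2.2 ≤ p.2.2) := by
    rw [hbdef]; exact PySem.List.sorted_pairwise_rev a _
  have hle : ∀ x ∈ b, x.2.2 ≤ bx.2.2 := by
    intro x hx
    exact PySem.List.key_head_sorted_rev_ge a (fun e => e.2.2) (hbdef ▸ hbcons)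
      x (hba.mem_iff.mp hx)
  have hgoperm := pvGo_perm b bx.2.2 0 hpw hle
  have hsumab : ∀ t, pvSumT b t = pvSumT a t := by
    intro t
    exact ((hba.filter _).map _).sum_eq
  have hsumaz : ∀ t, pvSumT a t = pvSum (health.zip serverType) t := by
    intro t
    rw [pvSum, ← hfa, List.filter_map, List.map_map]
    rfl
  have hfeq : pvSumT b = pvSum (health.zip serverType) :=
    funext fun t => (hsumab t).trans (hsumaz t)
  rw [hfeq] at hgoperm
  -- B's dict
  set d := (health.zip serverType).foldl
      (fun d p => d.insert p.2 (d.getD p.2 0 + p.1)) PySem.Dict.empty with hd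
  have hkeys : d.keys = PySem.Set.ofList ((health.zip serverType).map (fun p => p.2)) := by
    rw [hd, PySem.Dict.keys_foldl_insert_key (health.zip serverType) (fun p => p.2)
      (fun d p => d.getD p.2 0 + p.1) PySem.Dict.empty, PySem.Dict.keys_empty,
      PySem.Set.ofList_eq_foldl]
    rfl
  have hnodup : d.keys.Nodup := by
    rw [hkeys]; exact PySem.Set.nodup_ofList _
  have hvals : d.values
      = (PySem.Set.ofList ((health.zip serverType).map (fun p => p.2))).map
          (pvSum (health.zip serverType)) := by
    rw [PySem.Dict.values_eq_map_keys d hnodup 0, hkeys]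
    apply List.map_congr_left
    intro t ht
    rw [hd, pvDict_getD, PySem.Dict.getD_empty, zero_add]
  -- the distinct-type lists on both sides are permutations
  have hsetp : (bx.2.2 :: PySem.Set.ofList ((b.filter (fun x => !(x.2.2 == bx.2.2))).map (·.2.2))).Perm
      (PySem.Set.ofList ((health.zip serverType).map (fun p => p.2))) := by
    rw [List.perm_ext_iff_of_nodup ?_ (PySem.Set.nodup_ofList _)]
    · intro t
      simp only [List.mem_cons, PySem.Set.mem_ofList, List.mem_map, List.mem_filter]
      have hmem : (∃ y ∈ health.zip serverType, y.2 = t) ↔ (∃ y ∈ b, y.2.2 = t) := by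
        have h1 : t ∈ (health.zip serverType).map (fun p => p.2) ↔ t ∈ a.map (fun x => x.2.2) := by
          rw [hma]
        simp only [List.mem_map] at h1
        constructor
        · rintro ⟨y, hy, rfl⟩
          rcases h1.mp ⟨y, hy, rfl⟩ with ⟨w, hw, hwt⟩
          exact ⟨w, hba.mem_iff.mpr hw, hwt⟩
        · rintro ⟨y, hy, rfl⟩
          exact h1.mpr ⟨y, hba.mem_iff.mp hy, rfl⟩
      rw [hmem]
      constructor
      · rintro (rfl | ⟨y, ⟨hy, _⟩, rfl⟩)
        · exact ⟨bx, hbcons ▸ List.mem_cons_self, rfl⟩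
        · exact ⟨y, hy, rfl⟩
      · rintro ⟨y, hy, rfl⟩
        by_cases hyx : y.2.2 = bx.2.2
        · left; exact hyx
        · right; exact ⟨y, ⟨hy, by simpa using hyx⟩, rfl⟩
    · constructor
      · intro t ht
        rw [PySem.Set.mem_ofList] at ht
        rcases List.mem_map.mp ht with ⟨y, hy, rfl⟩
        have := List.of_mem_filter hy
        simp at this
        omega
      · exact PySem.Set.nodup_ofList _
  have hSperm : (pvGo bx.2.2 0 b).Perm d.values := by
    rw [hvals]
    refine hgoperm.trans ?_
    have := hsetp.map (pvSum (health.zip serverType))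
    simpa using this
  have hsort := pvSorted_rev_eq_of_perm _ _ hSperm
  rw [hget0, hfold', hsort]
  exact pvTail _ m

-- ===== VERDICT (by name: the statement is the Claim_ definition above) =====
theorem findMaxHealthSum_spec : Claim_equal_findMaxHealthSum := by
  intro health serverType m _ hpre
  exact pvMain health serverType m hpre.1 hpre.2
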